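-- pv_equiv track=rewrite | github.com/miny-genie/BOJ | acmicpc_9519.py | oneCycle
-- ===== SOURCE A (Python) =====
-- def oneCycle(input_text: list) -> list:
--     L = len(input_text)
--
--     front = input_text[:L // 2 + 1]
--     back = input_text[L // 2 + 1:]
--
--     text = []
--     for _ in range(len(back)):
--         text.append(front.pop(0))
--         text.append(back.pop())
--     text += front
--
--     return text
-- ===== SOURCE B (Python) =====
-- def oneCycle(input_text: list) -> list:
--     L = len(input_text)
--     half = L // 2 + 1
--     front = input_text[:half]
--     back = input_text[half:]
--     n = len(back)
--     result = [None] * L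
--     result[0:2 * n:2] = front[:n]
--     result[1:2 * n:2] = reversed(back)
--     result[2 * n:] = front[n:]
--     return result
-- ===== Notes on version B (the rewrite author's own statement) =====
-- stated objective: faster
-- what changed: Replaces A's pop-from-both-ends interleaving loop (with its O(n^2) front.pop(0) shifts and mutated working lists) by a preallocated result filled with three strided slice assignments; the input is never consumed element by element.
import Mathlib
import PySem

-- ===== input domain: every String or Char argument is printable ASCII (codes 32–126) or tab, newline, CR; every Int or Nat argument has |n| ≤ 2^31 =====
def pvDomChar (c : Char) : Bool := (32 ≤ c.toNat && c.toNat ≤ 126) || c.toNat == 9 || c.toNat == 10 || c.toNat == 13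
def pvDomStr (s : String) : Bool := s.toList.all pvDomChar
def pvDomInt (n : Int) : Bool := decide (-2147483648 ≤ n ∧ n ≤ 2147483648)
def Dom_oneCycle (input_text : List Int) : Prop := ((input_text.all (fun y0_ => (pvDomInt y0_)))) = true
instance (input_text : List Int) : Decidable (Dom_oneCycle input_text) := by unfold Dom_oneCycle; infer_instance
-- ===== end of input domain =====

-- B fills a preallocated result by strided slice assignments instead of A's pop-from-both-ends loop; return values proved equal (B performs no mutation of the argument, A does not either).

-- ===== PORT A =====
-- the 'for _ in range(len(back))' loop: state = (front, back, text); pops front[0] and back[-1]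
def oneCycleLoop : Nat → List Int → List Int → List Int → List Int
  | 0, front, _back, text => text ++ front
  | k + 1, front, back, text =>
    match PySem.List.pop? front 0, PySem.List.pop? back (-1) with
    | some (f, front'), some (b, back') => oneCycleLoop k front' back' (text ++ [f, b])
    | _, _ => text ++ front  -- unreachable: front/back are nonempty throughout the loop

def oneCycle (input_text : List Int) : List Int :=
  let L : Int := input_text.length
  let front := PySem.List.slice input_text none (some (PySem.Int.floordiv L 2 + 1))
  let back := PySem.List.slice input_text (some (PySem.Int.floordiv L 2 + 1)) none
  oneCycleLoop back.length front back []

-- ===== PORT B =====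
-- result[0:2n:2] = front[:n]; result[1:2n:2] = reversed(back); result[2n:] = front[n:]
-- ported as: the even/odd strided writes build the interleaved prefix, then the tail is appended
def oneCycle_alt (input_text : List Int) : List Int :=
  let L : Int := input_text.length
  let half : Int := PySem.Int.floordiv L 2 + 1
  let front := PySem.List.slice input_text none (some half)
  let back := PySem.List.slice input_text (some half) none
  let n := back.length
  ((front.take n).zip back.reverse).flatMap (fun p => [p.1, p.2]) ++ front.drop n

-- ===== PRECONDITION & SPEC =====
def Spec_oneCycle (input_text : List Int) (out : List Int) : Prop := out = oneCycle_alt input_text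
instance (input_text : List Int) (out : List Int) : Decidable (Spec_oneCycle input_text out) := by unfold Spec_oneCycle; infer_instance

-- ===== CLAIM (what is proved, stated in full; the proofs are below) =====
def Claim_equal_oneCycle : Prop := ∀ (input_text : List Int), Dom_oneCycle input_text → Spec_oneCycle input_text (oneCycle input_text)

-- ===== LEMMAS AND PROOFS =====

theorem oneCycleLoop_eq (back : List Int) : ∀ (front text : List Int),
    back.length ≤ front.length →
    oneCycleLoop back.length front back text =
      text ++ (((front.take back.length).zip back.reverse).flatMap (fun p => [p.1, p.2]) ++ front.drop back.length) := by
  induction back using List.reverseRecOn with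
  | nil => intro front text _; simp [oneCycleLoop]
  | append_singleton bs b ih =>
    intro front text hle
    simp only [List.length_append, List.length_singleton] at hle ⊢
    cases front with
    | nil => simp at hle
    | cons f fs =>
      have hfs : bs.length ≤ fs.length := by simpa using hle
      rw [show bs.length + 1 = bs.length + 1 from rfl]
      simp only [oneCycleLoop, PySem.List.pop?_zero_cons, PySem.List.pop?_last]
      rw [ih fs (text ++ [f, b]) hfs]
      simp [List.take_succ_cons, List.zip_cons_cons, List.flatMap_cons]

-- ===== VERDICT (by name: the statement is the Claim_ definition above) =====

theorem oneCycle_spec : Claim_equal_oneCycle := by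
  intro input_text _
  unfold Spec_oneCycle oneCycle oneCycle_alt
  simp only
  apply oneCycleLoop_eq
  -- back.length ≤ front.length for the slices at L//2+1
  have h : PySem.Int.floordiv (input_text.length : Int) 2 + 1
      = ((input_text.length / 2 + 1 : Nat) : Int) := by
    have h2 : PySem.Int.floordiv ((input_text.length : Nat) : Int) ((2 : Nat) : Int)
        = ((input_text.length / 2 : Nat) : Int) := PySem.Int.floordiv_natCast input_text.length 2
    push_cast at h2 ⊢
    rw [h2]
  rw [h, PySem.List.slice_to_natCast, PySem.List.slice_from_natCast]
  simp only [List.length_drop, List.length_take]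
  omega
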